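-- pv_equiv track=rewrite | github.com/Aditya7Chaudhary/Python-DSA | highest_lowest_freq_2.py | highest_lowest_freq_optimized
-- ===== SOURCE A (Python) =====
-- def highest_lowest_freq_optimized(nums, k):
--     nums.sort()
--     left = 0
--     total = 0
--     ans = 0
--
--     # 'right' expands the window
--     for right in range(len(nums)):
--         # Add the new number to our window sum
--         total += nums[right]
--
--         # LOGIC:
--         # We want to make all numbers in the window [left...right] equal to nums[right].
--         # The cost is: (target * count) - (current_sum)
--         # Cost = (nums[right] * window_length) - total
--
--         while (nums[right] * (right - left + 1)) - total > k:
--             # If cost is too high, shrink window from the left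
--             total -= nums[left]
--             left += 1
--
--         # Update max window size found so far
--         ans = max(ans, right - left + 1)
--
--     return ans
-- ===== SOURCE B (Python) =====
-- def highest_lowest_freq_optimized(nums, k):
--     nums.sort()
--     n = len(nums)
--     prefix = [0]
--     acc = 0
--     for x in nums:
--         acc += x
--         prefix.append(acc)
--     ans = 0
--     for r in range(n):
--         # binary search the smallest left l in [0, r] such that raising
--         # nums[l..r] to nums[r] costs at most k (cost is antitone in l)
--         lo, hi = 0, r
--         while lo < hi:
--             mid = (lo + hi) // 2
--             if nums[r] * (r - mid + 1) - (prefix[r + 1] - prefix[mid]) <= k: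
--                 hi = mid
--             else:
--                 lo = mid + 1
--         ans = max(ans, r - lo + 1)
--     return ans
-- ===== Notes on version B (the rewrite author's own statement) =====
-- stated objective: alternative
-- what changed: Replaces the two-pointer sliding window (running window sum, left pointer that never resets) with a prefix-sum array plus, for each right end, a binary search for the smallest feasible left, taking the max window length over all right ends; Pre_ excludes k < 0 with a nonempty list, where A's shrink loop raises IndexError.
import Mathlib
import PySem

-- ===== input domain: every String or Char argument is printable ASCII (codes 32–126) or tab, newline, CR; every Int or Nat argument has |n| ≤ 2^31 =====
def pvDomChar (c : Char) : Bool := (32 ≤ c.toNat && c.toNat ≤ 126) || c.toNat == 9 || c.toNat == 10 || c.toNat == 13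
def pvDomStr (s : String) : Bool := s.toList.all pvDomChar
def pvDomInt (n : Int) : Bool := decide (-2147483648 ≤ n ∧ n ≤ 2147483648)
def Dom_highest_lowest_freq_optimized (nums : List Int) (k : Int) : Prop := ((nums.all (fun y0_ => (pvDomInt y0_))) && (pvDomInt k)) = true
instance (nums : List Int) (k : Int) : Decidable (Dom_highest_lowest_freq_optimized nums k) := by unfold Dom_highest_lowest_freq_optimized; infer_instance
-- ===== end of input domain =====

-- B replaces A's two-pointer sliding window by prefix sums and a per-right-end binary
-- search for the smallest feasible left (objective: alternative, same asymptotic cost).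
-- Python A sorts nums in place; the equivalence proved here is about the RETURN value only
-- (B performs the same in-place sort).

-- ===== PORT A =====
-- A's inner `while` loop; `fuel` only makes the recursion structural (inside Pre_ the
-- condition fails before fuel runs out, so the port is exact there).  Indices reached by
-- the loop are nonnegative and in range inside Pre_, so `getD` is exact Python indexing.
def hlfAWhile (s : List Int) (r : Nat) (k : Int) : Nat → Nat → Int → Nat × Int
  | 0, left, total => (left, total)
  | fuel+1, left, total =>
    if s.getD r 0 * ((r : Int) - (left : Int) + 1) - total > k then
      hlfAWhile s r k fuel (left + 1) (total - s.getD left 0)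
    else (left, total)

def highest_lowest_freq_optimized (nums : List Int) (k : Int) : Int :=
  let s := PySem.List.sorted nums (fun x => x) false   -- nums.sort()
  let st := (List.range s.length).foldl
    (fun (st : Nat × Int × Int) r =>
      let total := st.2.1 + s.getD r 0
      let p := hlfAWhile s r k (s.length + 1) st.1 total
      (p.1, p.2, max st.2.2 ((r : Int) - (p.1 : Int) + 1)))
    (0, 0, 0)
  st.2.2

-- ===== PORT B =====
-- B's inner binary search: smallest l in [lo, hi] with cost(l, r) ≤ k.
def hlfBSearch (s pre : List Int) (r : Nat) (k : Int) (lo hi : Nat) : Nat :=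
  if h : lo < hi then
    let mid := (lo + hi) / 2
    if s.getD r 0 * ((r : Int) - (mid : Int) + 1) - (pre.getD (r + 1) 0 - pre.getD mid 0) ≤ k then
      hlfBSearch s pre r k lo mid
    else
      hlfBSearch s pre r k (mid + 1) hi
  else lo
termination_by hi - lo
decreasing_by all_goals omega

def highest_lowest_freq_optimized_alt (nums : List Int) (k : Int) : Int :=
  let s := PySem.List.sorted nums (fun x => x) false   -- nums.sort()
  let pre := (s.foldl (fun (st : List Int × Int) x =>
      (st.1 ++ [st.2 + x], st.2 + x)) ([0], 0)).1      -- prefix-sum list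
  (List.range s.length).foldl
    (fun (ans : Int) (r : Nat) => max ans ((r : Int) - (hlfBSearch s pre r k 0 r : Int) + 1)) 0

-- ===== PRECONDITION & SPEC =====
-- Pre_ excludes k < 0 with nonempty nums: there A's shrink loop never stops (cost of a
-- size-1 window is 0 > k) and walks the left pointer off the list, raising IndexError.
def Pre_highest_lowest_freq_optimized (nums : List Int) (k : Int) : Prop :=
  nums = [] ∨ 0 ≤ k
instance (nums : List Int) (k : Int) : Decidable (Pre_highest_lowest_freq_optimized nums k) := by
  unfold Pre_highest_lowest_freq_optimized; infer_instance

def pvWitness_highest_lowest_freq_optimized : List Int × Int := ([4, 1, 2, 2], 3)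

def Spec_highest_lowest_freq_optimized (nums : List Int) (k : Int) (out : Int) : Prop := out = highest_lowest_freq_optimized_alt nums k
instance (nums : List Int) (k : Int) (out : Int) : Decidable (Spec_highest_lowest_freq_optimized nums k out) := by unfold Spec_highest_lowest_freq_optimized; infer_instance

-- ===== CLAIM (what is proved, stated in full; the proofs are below) =====
def Claim_equal_highest_lowest_freq_optimized : Prop := ∀ (nums : List Int) (k : Int), Dom_highest_lowest_freq_optimized nums k → Pre_highest_lowest_freq_optimized nums k → Spec_highest_lowest_freq_optimized nums k (highest_lowest_freq_optimized nums k)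

-- ===== LEMMAS AND PROOFS =====

-- Spec-side abbreviations over the sorted list s.
def hlfP (s : List Int) (i : Nat) : Int := (s.take i).sum

def hlfCost (s : List Int) (l r : Nat) : Int :=
  s.getD r 0 * ((r : Int) - (l : Int) + 1) - (hlfP s (r + 1) - hlfP s l)

def hlfp (s : List Int) (k : Int) (r l : Nat) : Prop := l = r ∨ hlfCost s l r ≤ k

def hlfpB (s : List Int) (k : Int) (r l : Nat) : Bool :=
  (l == r) || decide (hlfCost s l r ≤ k)

def hlfMinL (s : List Int) (k : Int) (r : Nat) : Nat :=
  Nat.find (p := fun l => hlfpB s k r l = true) ⟨r, by simp [hlfpB]⟩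

theorem hlfp_iff (s : List Int) (k : Int) (r l : Nat) :
    hlfpB s k r l = true ↔ hlfp s k r l := by
  simp [hlfpB, hlfp]

theorem hlfMinL_spec' (s : List Int) (k : Int) (r : Nat) : hlfp s k r (hlfMinL s k r) := by
  unfold hlfMinL
  exact (hlfp_iff _ _ _ _).mp (Nat.find_spec (p := fun l => hlfpB s k r l = true) ⟨r, by simp [hlfpB]⟩)

theorem hlfMinL_min' (s : List Int) (k : Int) (r l : Nat) (h : l < hlfMinL s k r) :
    ¬ hlfp s k r l := by
  unfold hlfMinL at h
  intro hp
  exact Nat.find_min (p := fun l => hlfpB s k r l = true) ⟨r, by simp [hlfpB]⟩ h ((hlfp_iff _ _ _ _).mpr hp)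

theorem hlfMinL_le' (s : List Int) (k : Int) (r l : Nat) (h : hlfp s k r l) :
    hlfMinL s k r ≤ l := by
  unfold hlfMinL
  exact Nat.find_le ((hlfp_iff _ _ _ _).mpr h)

-- running answer of both programs
def hlfAns (s : List Int) (k : Int) : Nat → Int
  | 0 => 0
  | m + 1 => max (hlfAns s k m) ((m : Int) - (hlfMinL s k m : Int) + 1)

-- left pointer of A before processing index m
def hlfLft (s : List Int) (k : Int) : Nat → Nat
  | 0 => 0
  | m + 1 => hlfMinL s k m

-- Python-side partial sums of B's prefix list
def hlfPsums (acc : Int) : List Int → List Int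
  | [] => []
  | x :: xs => (acc + x) :: hlfPsums (acc + x) xs

theorem hlfP_succ (s : List Int) (i : Nat) (hi : i < s.length) :
    hlfP s (i + 1) = hlfP s i + s.getD i 0 := by
  unfold hlfP
  rw [List.sum_take_succ _ _ hi, List.getD_eq_getElem s 0 hi]

theorem hlf_sorted_getD_le (s : List Int) (hs : s.Pairwise (· ≤ ·)) (i j : Nat)
    (hij : i ≤ j) (hj : j < s.length) : s.getD i 0 ≤ s.getD j 0 := by
  rcases eq_or_lt_of_le hij with rfl | h
  · rfl
  · rw [List.getD_eq_getElem s 0 (lt_trans h hj), List.getD_eq_getElem s 0 hj]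
    exact List.pairwise_iff_getElem.mp hs i j _ _ h

theorem hlfCost_anti_step (s : List Int) (hs : s.Pairwise (· ≤ ·)) (a r : Nat)
    (h1 : a < r) (hr : r < s.length) :
    hlfCost s (a + 1) r ≤ hlfCost s a r := by
  have hg : s.getD a 0 ≤ s.getD r 0 := hlf_sorted_getD_le s hs a r (le_of_lt h1) hr
  have hp : hlfP s (a + 1) = hlfP s a + s.getD a 0 := hlfP_succ s a (lt_trans h1 hr)
  unfold hlfCost
  rw [hp]; push_cast; nlinarith

theorem hlfCost_anti (s : List Int) (hs : s.Pairwise (· ≤ ·)) (l l' r : Nat)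
    (h1 : l ≤ l') (h2 : l' ≤ r) (hr : r < s.length) :
    hlfCost s l' r ≤ hlfCost s l r := by
  induction l', h1 using Nat.le_induction with
  | base => exact le_rfl
  | succ n hn ih =>
      exact le_trans (hlfCost_anti_step s hs n r (by omega) hr) (ih (by omega))

theorem hlfCost_self (s : List Int) (r : Nat) (hr : r < s.length) : hlfCost s r r = 0 := by
  unfold hlfCost
  rw [hlfP_succ s r hr]; ring

theorem hlfCost_mono_r (s : List Int) (hs : s.Pairwise (· ≤ ·)) (l r : Nat)
    (hlr : l ≤ r) (hr : r + 1 < s.length) : hlfCost s l r ≤ hlfCost s l (r + 1) := by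
  have hg : s.getD r 0 ≤ s.getD (r + 1) 0 :=
    hlf_sorted_getD_le s hs r (r + 1) (by omega) hr
  have hl : (0 : Int) ≤ ((r : Int) - (l : Int) + 1) := by
    have : (l : Int) ≤ (r : Int) := by exact_mod_cast hlr
    linarith
  have key : 0 ≤ (s.getD (r + 1) 0 - s.getD r 0) * ((r : Int) - (l : Int) + 1) :=
    mul_nonneg (by linarith) hl
  unfold hlfCost
  rw [hlfP_succ s (r + 1) hr]; push_cast; nlinarith

theorem hlfMinL_le (s : List Int) (k : Int) (r : Nat) : hlfMinL s k r ≤ r := by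
  exact hlfMinL_le' s k r r (Or.inl rfl)

theorem hlfMinL_cost_le (s : List Int) (k : Int) (r : Nat) (hk : 0 ≤ k) (hr : r < s.length) :
    hlfCost s (hlfMinL s k r) r ≤ k := by
  have h : hlfp s k r (hlfMinL s k r) := hlfMinL_spec' s k r
  rcases h with h | h
  · rw [h, hlfCost_self s r hr]; exact hk
  · exact h

theorem hlfMinL_gt (s : List Int) (k : Int) (r l : Nat) (hl : l < hlfMinL s k r) :
    k < hlfCost s l r := by
  have h : ¬ hlfp s k r l := hlfMinL_min' s k r l hl
  simp only [hlfp, not_or, not_le] at h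
  exact h.2

theorem hlfMinL_mono (s : List Int) (hs : s.Pairwise (· ≤ ·)) (k : Int) (r : Nat)
    (hr : r + 1 < s.length) : hlfMinL s k r ≤ hlfMinL s k (r + 1) := by
  by_cases h : r ≤ hlfMinL s k (r + 1)
  · exact le_trans (hlfMinL_le s k r) h
  · rw [not_le] at h
    have hp : hlfp s k (r + 1) (hlfMinL s k (r + 1)) := hlfMinL_spec' s k (r + 1)
    rcases hp with hp | hp
    · omega
    · have : hlfCost s (hlfMinL s k (r + 1)) r ≤ k :=
        le_trans (hlfCost_mono_r s hs _ r (by omega) hr) hp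
      exact hlfMinL_le' s k r _ (Or.inr this)

-- A's while loop reaches exactly hlfMinL.
theorem hlfAWhile_eq (s : List Int) (k : Int) (hk : 0 ≤ k)
    (r : Nat) (hr : r < s.length) :
    ∀ fuel left, left ≤ hlfMinL s k r → hlfMinL s k r - left < fuel →
      hlfAWhile s r k fuel left (hlfP s (r + 1) - hlfP s left) =
        (hlfMinL s k r, hlfP s (r + 1) - hlfP s (hlfMinL s k r)) := by
  intro fuel
  induction fuel with
  | zero => intro left h1 h2; omega
  | succ fuel ih =>
      intro left h1 h2
      rcases eq_or_lt_of_le h1 with rfl | hlt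
      · have hc : ¬ (s.getD r 0 * ((r : Int) - ((hlfMinL s k r : Nat) : Int) + 1) -
            (hlfP s (r + 1) - hlfP s (hlfMinL s k r)) > k) := by
          have := hlfMinL_cost_le s k r hk hr
          unfold hlfCost at this
          simp only [not_lt]
          linarith
        simp only [hlfAWhile, hc, if_false]
      · have hc : s.getD r 0 * ((r : Int) - (left : Int) + 1) -
            (hlfP s (r + 1) - hlfP s left) > k := hlfMinL_gt s k r left hlt
        simp only [hlfAWhile, hc, if_true]
        have hlen : left < s.length := by
          have := hlfMinL_le s k r; omega
        have htot : hlfP s (r + 1) - hlfP s left - s.getD left 0 =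
            hlfP s (r + 1) - hlfP s (left + 1) := by
          rw [hlfP_succ s left hlen]; ring
        rw [htot]
        exact ih (left + 1) (by omega) (by omega)

-- B's prefix list computes hlfP.
theorem hlfPsums_foldl (s : List Int) : ∀ (p : List Int) (acc : Int),
    s.foldl (fun (st : List Int × Int) x => (st.1 ++ [st.2 + x], st.2 + x)) (p, acc)
      = (p ++ hlfPsums acc s, acc + s.sum) := by
  induction s with
  | nil => intro p acc; simp [hlfPsums]
  | cons x xs ih =>
      intro p acc
      simp only [List.foldl_cons, ih, hlfPsums]
      simp [add_assoc]

theorem hlfPsums_getD (s : List Int) : ∀ (acc : Int) (i : Nat), i < s.length →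
    (hlfPsums acc s).getD i 0 = acc + hlfP s (i + 1) := by
  induction s with
  | nil => intro acc i hi; simp at hi
  | cons x xs ih =>
      intro acc i hi
      cases i with
      | zero => simp [hlfPsums, hlfP]
      | succ j =>
          simp only [hlfPsums, List.getD_cons_succ]
          rw [ih (acc + x) j (by simpa using hi)]
          simp only [hlfP, List.take_succ_cons, List.sum_cons]
          ring

theorem hlfPre_getD (s : List Int) (i : Nat) (hi : i ≤ s.length) :
    ((s.foldl (fun (st : List Int × Int) x => (st.1 ++ [st.2 + x], st.2 + x)) ([0], 0)).1).getD i 0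
      = hlfP s i := by
  rw [hlfPsums_foldl s [0] 0]
  cases i with
  | zero => simp [hlfP]
  | succ j =>
      simp only [List.cons_append, List.nil_append, List.getD_cons_succ]
      rw [hlfPsums_getD s 0 j (by omega)]
      ring

-- B's binary search reaches exactly hlfMinL.
theorem hlfBSearch_eq (s pre : List Int) (hs : s.Pairwise (· ≤ ·)) (k : Int) (hk : 0 ≤ k)
    (r : Nat) (hr : r < s.length)
    (hpre : ∀ i, i ≤ s.length → pre.getD i 0 = hlfP s i) :
    ∀ lo hi, lo ≤ hlfMinL s k r → hlfMinL s k r ≤ hi → hi ≤ r →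
      hlfBSearch s pre r k lo hi = hlfMinL s k r := by
  have H : ∀ d lo hi, hi - lo = d → lo ≤ hlfMinL s k r → hlfMinL s k r ≤ hi → hi ≤ r →
      hlfBSearch s pre r k lo hi = hlfMinL s k r := by
    intro d
    induction d using Nat.strong_induction_on with
    | _ d ih =>
      intro lo hi hd h1 h2 h3
      rw [hlfBSearch]
      by_cases hlohi : lo < hi
      · rw [dif_pos hlohi]
        simp only []
        rw [hpre (r + 1) (by omega), hpre ((lo + hi) / 2) (by omega)]
        by_cases hc : s.getD r 0 * ((r : Int) - (((lo + hi) / 2 : Nat) : Int) + 1) -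
            (hlfP s (r + 1) - hlfP s ((lo + hi) / 2)) ≤ k
        · rw [if_pos hc]
          have hfind : hlfMinL s k r ≤ (lo + hi) / 2 :=
            hlfMinL_le' s k r _ (Or.inr hc)
          exact ih ((lo + hi) / 2 - lo) (by omega) lo ((lo + hi) / 2) rfl h1 hfind (by omega)
        · rw [if_neg hc]
          have hgt : (lo + hi) / 2 < hlfMinL s k r := by
            by_contra hge
            rw [not_lt] at hge
            have : hlfCost s ((lo + hi) / 2) r ≤ hlfCost s (hlfMinL s k r) r :=
              hlfCost_anti s hs (hlfMinL s k r) ((lo + hi) / 2) r hge (by omega) hr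
            have h2' := hlfMinL_cost_le s k r hk hr
            exact hc (by unfold hlfCost at this h2'; linarith)
          exact ih (hi - ((lo + hi) / 2 + 1)) (by omega) ((lo + hi) / 2 + 1) hi rfl
            (by omega) h2 h3
      · rw [dif_neg hlohi]
        omega
  intro lo hi h1 h2 h3
  exact H (hi - lo) lo hi rfl h1 h2 h3

-- A's fold invariant.
theorem hlfA_fold (s : List Int) (hs : s.Pairwise (· ≤ ·)) (k : Int) (hk : 0 ≤ k)
    (m : Nat) : m ≤ s.length →
    (List.range m).foldl
      (fun (st : Nat × Int × Int) r =>
        let total := st.2.1 + s.getD r 0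
        let p := hlfAWhile s r k (s.length + 1) st.1 total
        (p.1, p.2, max st.2.2 ((r : Int) - (p.1 : Int) + 1)))
      (0, 0, 0)
    = (hlfLft s k m, hlfP s m - hlfP s (hlfLft s k m), hlfAns s k m) := by
  induction m with
  | zero => intro _; simp [hlfLft, hlfAns, hlfP]
  | succ m ih =>
      intro hm
      rw [List.range_succ, List.foldl_append, ih (by omega)]
      simp only [List.foldl_cons, List.foldl_nil]
      have htot : hlfP s m - hlfP s (hlfLft s k m) + s.getD m 0
          = hlfP s (m + 1) - hlfP s (hlfLft s k m) := by
        rw [hlfP_succ s m (by omega)]; ring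
      rw [htot]
      have hle : hlfLft s k m ≤ hlfMinL s k m := by
        cases m with
        | zero => simp [hlfLft]
        | succ j => exact hlfMinL_mono s hs k j (by omega)
      have hml := hlfMinL_le s k m
      rw [hlfAWhile_eq s k hk m (by omega) (s.length + 1) (hlfLft s k m) hle (by omega)]
      simp [hlfLft, hlfAns]

-- B's fold invariant.
theorem hlfB_fold (s pre : List Int) (hs : s.Pairwise (· ≤ ·)) (k : Int) (hk : 0 ≤ k)
    (hpre : ∀ i, i ≤ s.length → pre.getD i 0 = hlfP s i)
    (m : Nat) : m ≤ s.length →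
    (List.range m).foldl
      (fun (ans : Int) (r : Nat) => max ans ((r : Int) - (hlfBSearch s pre r k 0 r : Int) + 1)) 0
    = hlfAns s k m := by
  induction m with
  | zero => intro _; simp [hlfAns]
  | succ m ih =>
      intro hm
      rw [List.range_succ, List.foldl_append, ih (by omega)]
      simp only [List.foldl_cons, List.foldl_nil]
      rw [hlfBSearch_eq s pre hs k hk m (by omega) hpre 0 m (by omega) (hlfMinL_le s k m) le_rfl]
      simp [hlfAns]

-- ===== VERDICT (by name: the statement is the Claim_ definition above) =====
theorem highest_lowest_freq_optimized_spec : Claim_equal_highest_lowest_freq_optimized := by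
  intro nums k _ hpre
  unfold Spec_highest_lowest_freq_optimized
  rcases hpre with rfl | hk
  · rfl
  · simp only [highest_lowest_freq_optimized, highest_lowest_freq_optimized_alt]
    have hs : (PySem.List.sorted nums (fun x => x) false).Pairwise (· ≤ ·) := by
      simpa using PySem.List.sorted_pairwise (xs := nums) (key := fun x => x)
    rw [hlfA_fold _ hs k hk _ le_rfl,
      hlfB_fold _ _ hs k hk (hlfPre_getD _) _ le_rfl]
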